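-- pv_equiv track=rewrite | github.com/Dekker1/RectEuler | docker-files/worker/code/SplittingStrategies.py | removeAllMaxElement
-- ===== SOURCE A (Python) =====
-- def removeAllMaxElement(reduced):
--     countDict = {}
--     for k, v in reduced.items():
--         for element in v:
--             key = element
--             if isinstance(key, (list, tuple)):
--                 key = tuple(key)
--             if key not in countDict:
--                 countDict[key] = [k]
--             else:
--                 countDict[key].append(k)
--     maxCount = 0
--     maxElements = []
--     for k, v in countDict.items():
--         if len(v) > maxCount:
--             maxElement = k
--             maxCount = len(v)
--
--     setsToDeleteElementFrom = countDict[maxElement]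
--     for s in setsToDeleteElementFrom:
--         if isinstance(maxElement, tuple):
--             maxElement = list(maxElement)
--         reduced[s].remove(maxElement)
--
--     newdict = {}
--     for s in setsToDeleteElementFrom:
--         newdict[s] = [maxElement]
--     return reduced, newdict
-- ===== SOURCE B (Python) =====
-- def removeAllMaxElement(reduced):
--     elems = [tuple(e) if isinstance(e, (list, tuple)) else e
--              for v in reduced.values() for e in v]
--     counts = {}
--     for k in elems:
--         counts[k] = counts.get(k, 0) + 1
--     maxCount = 0
--     seen = set()
--     for k in elems:
--         if k not in seen:
--             seen.add(k)
--             if counts[k] > maxCount: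
--                 maxElement = k
--                 maxCount = counts[k]
--     if isinstance(maxElement, tuple):
--         maxElement = list(maxElement)
--     newreduced = {k: [e for e in v if e != maxElement] for k, v in reduced.items()}
--     newdict = {k: [maxElement] for k, v in reduced.items() if maxElement in v}
--     return newreduced, newdict
-- ===== Notes on version B (the rewrite author's own statement) =====
-- stated objective: alternative
-- what changed: A builds a dict mapping each element to the list of keys of the sets it occurs in and then mutates the input in place with repeated list.remove; B uses no such dict: it flattens all values into one list, counts occurrences in one pass, picks the first element of maximal count with a seen-set loop over the flat list, and rebuilds both returned dicts with comprehensions (same return value; A's in-place mutation of its argument is not reproduced).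
import Mathlib
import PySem

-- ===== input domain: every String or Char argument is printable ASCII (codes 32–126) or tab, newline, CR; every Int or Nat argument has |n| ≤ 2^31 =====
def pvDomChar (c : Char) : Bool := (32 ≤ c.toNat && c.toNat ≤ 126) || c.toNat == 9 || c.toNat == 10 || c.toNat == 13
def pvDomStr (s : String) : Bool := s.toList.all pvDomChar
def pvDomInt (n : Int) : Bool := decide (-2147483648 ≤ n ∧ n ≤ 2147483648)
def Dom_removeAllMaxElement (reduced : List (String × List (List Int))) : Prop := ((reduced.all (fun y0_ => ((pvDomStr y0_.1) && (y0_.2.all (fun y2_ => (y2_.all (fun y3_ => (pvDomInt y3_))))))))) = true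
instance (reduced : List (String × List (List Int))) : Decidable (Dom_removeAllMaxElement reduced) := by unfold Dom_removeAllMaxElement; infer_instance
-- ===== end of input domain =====

-- B drops A's element→owning-keys dict entirely: it flattens the values into one list, finds the max
-- element with a seen-set dedup loop over that list using .count, and rebuilds both result dicts with
-- comprehensions instead of in-place removals (same returned value; A mutates its argument in place,
-- B does not — the equivalence proved here is about the RETURN value only).

-- ===== PORT A =====
-- countDict: element ↦ list of keys of the sets it occurs in (one entry per occurrence);
-- the maxElement variable being unassigned (Python: NameError) is modelled by `none`.
def removeAllMaxElement (reduced : List (String × List (List Int))) : (List (String × List (List Int))) × (List (String × List (List Int))) :=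
  let countDict : PySem.Dict (List Int) (List String) :=
    reduced.foldl (fun d kv => kv.2.foldl (fun d e =>
      if d.contains e = false then d.insert e [kv.1]
      else d.modify e [] (fun l => l ++ [kv.1])) d) (PySem.Dict.mk [])
  let r := countDict.items.foldl (fun (st : Int × Option (List Int)) p =>
      if PySem.List.len p.2 > st.1 then (PySem.List.len p.2, some p.1) else st) (0, none)
  match r.2 with
  | none => ([], [])   -- Python raises NameError here; excluded by Pre_
  | some m =>
    let sets := countDict.getD m []
    -- reduced[s].remove(maxElement): s and the element are present under Pre_, so the .getD fallback is never taken
    let rd := sets.foldl (fun (d : PySem.Dict String (List (List Int))) s =>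
        d.modify s [] (fun v => (PySem.List.remove? v m).getD v)) (PySem.Dict.mk reduced)
    let newdict := sets.foldl (fun (d : PySem.Dict String (List (List Int))) s => d.insert s [m]) (PySem.Dict.mk [])
    (rd.items, newdict.items)

-- ===== PORT B =====
-- no element→keys dict: flat occurrence list, one counting pass, a seen-set loop picking the first
-- element of maximal count, and comprehensions for the two outputs
def removeAllMaxElement_alt (reduced : List (String × List (List Int))) : (List (String × List (List Int))) × (List (String × List (List Int))) :=
  let elems := reduced.flatMap (fun kv => kv.2)
  let counts : PySem.Dict (List Int) Int :=
    elems.foldl (fun d k => d.insert k (d.getD k 0 + 1)) (PySem.Dict.mk [])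
  let r := elems.foldl (fun (st : PySem.Set (List Int) × Int × Option (List Int)) k =>
      if PySem.Set.contains st.1 k then st
      else (PySem.Set.add st.1 k,
            if counts.getD k 0 > st.2.1 then (counts.getD k 0, some k) else st.2))
    (PySem.Set.empty, 0, none)
  match r.2.2 with
  | none => ([], [])   -- Python raises NameError here; excluded by Pre_
  | some m =>
    (reduced.map (fun kv => (kv.1, kv.2.filter (fun e => !(e == m)))),
     (reduced.filter (fun kv => kv.2.contains m)).map (fun kv => (kv.1, [m])))

-- ===== PRECONDITION & SPEC =====
-- Pre_ excludes (a) association lists with duplicate keys, which do not denote a Python dict (the dict the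
-- harness would build collapses them, so A's behaviour on the raw list is not defined by the source), and
-- (b) inputs whose value lists are all empty, on which A raises NameError/UnboundLocalError (maxElement unassigned).
def Pre_removeAllMaxElement (reduced : List (String × List (List Int))) : Prop :=
  (reduced.map Prod.fst).Nodup ∧ ∃ kv ∈ reduced, kv.2 ≠ []
instance (reduced : List (String × List (List Int))) : Decidable (Pre_removeAllMaxElement reduced) := by unfold Pre_removeAllMaxElement; infer_instance

def pvWitness_removeAllMaxElement : (List (String × List (List Int))) := [("a", [[1], [2]]), ("b", [[1]])]

def Spec_removeAllMaxElement (reduced : List (String × List (List Int))) (out : (List (String × List (List Int))) × (List (String × List (List Int)))) : Prop := out = removeAllMaxElement_alt reduced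
instance (reduced : List (String × List (List Int))) (out : (List (String × List (List Int))) × (List (String × List (List Int)))) : Decidable (Spec_removeAllMaxElement reduced out) := by unfold Spec_removeAllMaxElement; infer_instance

-- ===== CLAIM (what is proved, stated in full; the proofs are below) =====
def Claim_equal_removeAllMaxElement : Prop := ∀ (reduced : List (String × List (List Int))), Dom_removeAllMaxElement reduced → Pre_removeAllMaxElement reduced → Spec_removeAllMaxElement reduced (removeAllMaxElement reduced)

-- ===== LEMMAS AND PROOFS =====

-- occurrence pairs (element, owning key), in A's traversal order, and the flat element list
def pvOcc (R : List (String × List (List Int))) : List (List Int × String) :=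
  R.flatMap (fun kv => kv.2.map (fun e => (e, kv.1)))

def pvElems (R : List (String × List (List Int))) : List (List Int) :=
  R.flatMap (fun kv => kv.2)

-- the list countDict stores at key k (one owning key per occurrence)
def pvGrp (R : List (String × List (List Int))) (k : List Int) : List String :=
  ((pvOcc R).filter (fun p => p.1 == k)).map (fun p => p.2)

-- remove-first-occurrence of m, total form used by port A
def pvRm (m : List Int) (v : List (List Int)) : List (List Int) :=
  (PySem.List.remove? v m).getD v

lemma pvOcc_map_fst (R : List (String × List (List Int))) :
    (pvOcc R).map Prod.fst = pvElems R := by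
  simp [pvOcc, pvElems, List.map_flatMap, Function.comp_def]

lemma countDict_eq (R : List (String × List (List Int))) :
    (R.foldl (fun d kv => kv.2.foldl (fun d e =>
      if d.contains e = false then d.insert e [kv.1]
      else d.modify e [] (fun l => l ++ [kv.1])) d) (PySem.Dict.mk []))
    = (pvOcc R).foldl (fun d p => d.modify p.1 [] (fun l => l ++ [p.2])) (PySem.Dict.mk []) := by
  have hstep : ∀ (d : PySem.Dict (List Int) (List String)) (k : String) (e : List Int),
      (if d.contains e = false then d.insert e [k]
       else d.modify e [] (fun l => l ++ [k])) = d.modify e [] (fun l => l ++ [k]) := by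
    intro d k e
    by_cases h : d.contains e = true
    · simp [h]
    · simp only [Bool.not_eq_true] at h
      simp [h, PySem.Dict.modify, PySem.Dict.getD_of_not_contains _ _ h]
  simp only [pvOcc, List.foldl_flatMap, List.foldl_map, hstep]

lemma countDict_getD (R : List (String × List (List Int))) (m : List Int) :
    ((pvOcc R).foldl (fun d p => d.modify p.1 [] (fun l => l ++ [p.2])) (PySem.Dict.mk [])).getD m []
    = pvGrp R m := by
  rw [PySem.Dict.getD_foldl_modify_append]
  simp [pvGrp]
  rfl

lemma countDict_items (R : List (String × List (List Int))) :
    ((pvOcc R).foldl (fun d p => d.modify p.1 [] (fun l => l ++ [p.2])) (PySem.Dict.mk [])).items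
    = (PySem.Set.ofList (pvElems R)).map (fun k => (k, pvGrp R k)) := by
  have hnd : ((pvOcc R).foldl (fun d p => d.modify p.1 [] (fun l => l ++ [p.2])) (PySem.Dict.mk [])).keys.Nodup := by
    apply PySem.Dict.nodup_keys_foldl_modify_key (key := Prod.fst)
    simp [PySem.Dict.keys]
  have hk : ((pvOcc R).foldl (fun d p => d.modify p.1 [] (fun l => l ++ [p.2])) (PySem.Dict.mk [])).keys
      = PySem.Set.ofList (pvElems R) := by
    rw [PySem.Dict.keys_foldl_modify_key (key := Prod.fst)]
    rw [pvOcc_map_fst]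
    simp [PySem.Dict.keys, PySem.Set.update, PySem.Set.ofList_eq_foldl]
  rw [PySem.Dict.items_eq_map_keys _ hnd [], hk]
  apply List.map_congr_left
  intro k _
  rw [PySem.Dict.getD_foldl_modify_append]
  simp [pvGrp]
  rfl

lemma len_pvGrp (R : List (String × List (List Int))) (k : List Int) :
    PySem.List.len (pvGrp R k) = ((pvElems R).count k : Int) := by
  rw [PySem.List.len_eq]
  rw [← pvOcc_map_fst]
  simp only [pvGrp, List.length_map, ← List.countP_eq_length_filter, List.count_eq_countP,
    List.countP_map, Function.comp_def]

-- B's seen-set loop processes exactly the first occurrences, in first-occurrence order: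
-- it is the plain max-scan over set(l) (minus the starting seen-set)
lemma contains_add_set (S : PySem.Set (List Int)) (k a : List Int) :
    PySem.Set.contains (PySem.Set.add S k) a = (PySem.Set.contains S a || a == k) := by
  apply Bool.eq_iff_iff.mpr
  simp only [Bool.or_eq_true, beq_iff_eq, PySem.Set.contains_iff, PySem.Set.mem_add]

lemma seen_fold (f : List Int → Int) :
    ∀ (l : List (List Int)) (S : PySem.Set (List Int)) (st : Int × Option (List Int)),
    (l.foldl (fun (p : PySem.Set (List Int) × Int × Option (List Int)) k =>
        if PySem.Set.contains p.1 k then p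
        else (PySem.Set.add p.1 k,
          if f k > p.2.1 then (f k, some k) else p.2))
      (S, st)).2
    = ((PySem.Set.ofList l).filter (fun a => !(PySem.Set.contains S a))).foldl
        (fun (st : Int × Option (List Int)) k =>
          if f k > st.1 then (f k, some k) else st) st := by
  intro l
  induction l with
  | nil => intro S st; rfl
  | cons k t ih =>
    intro S st
    rw [PySem.Set.ofList_cons]
    by_cases hk : PySem.Set.contains S k = true
    · simp only [List.foldl_cons, hk, if_true, ih]
      congr 1
      rw [List.filter_cons_of_neg (by simp only [hk]; simp), PySem.Set.discard, List.filter_filter]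
      apply List.filter_congr
      intro a _
      by_cases ha : a = k
      · subst ha; simp only [hk]; simp
      · simp [ha]
    · simp only [Bool.not_eq_true] at hk
      simp only [List.foldl_cons, hk, Bool.false_eq_true, if_false, ih]
      rw [List.filter_cons_of_pos (by simp only [hk]; simp), List.foldl_cons]
      congr 1
      rw [PySem.Set.discard, List.filter_filter]
      apply List.filter_congr
      intro a _
      rw [contains_add_set]
      simp

-- pointwise effect of A's removal loop on the dict value at k
lemma getD_foldl_modify_rm (m : List Int) :
    ∀ (sets : List String) (d : PySem.Dict String (List (List Int))) (k : String),
    (sets.foldl (fun d s => d.modify s [] (fun v => pvRm m v)) d).getD k []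
      = (pvRm m)^[sets.count k] (d.getD k []) := by
  intro sets
  induction sets with
  | nil => intro d k; simp
  | cons s t ih =>
    intro d k
    simp only [List.foldl_cons, ih]
    by_cases hk : k = s
    · subst hk
      rw [PySem.Dict.getD_modify_self, List.count_cons_self, Function.iterate_succ_apply]
    · rw [PySem.Dict.getD_modify_of_ne _ _ _ hk]; simp [Ne.symm hk]

lemma rm_cons_ne (m a : List Int) (t : List (List Int)) (h : ¬ a = m) :
    pvRm m (a :: t) = a :: pvRm m t := by
  rw [pvRm, PySem.List.remove?_cons_of_ne _ h]
  cases hr : PySem.List.remove? t m with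
  | none => simp [pvRm, hr]
  | some l => simp [pvRm, hr]

lemma rm_iter_cons (m a : List Int) (h : ¬ a = m) :
    ∀ (n : Nat) (t : List (List Int)), (pvRm m)^[n] (a :: t) = a :: (pvRm m)^[n] t := by
  intro n
  induction n with
  | zero => simp
  | succ n ih =>
    intro t
    rw [Function.iterate_succ_apply, Function.iterate_succ_apply, rm_cons_ne m a t h, ih]

-- removing the element count-many times is exactly the filter B computes
lemma rm_iter_count (m : List Int) :
    ∀ (v : List (List Int)), (pvRm m)^[v.count m] v = v.filter (fun e => !(e == m)) := by
  intro v
  induction v with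
  | nil => simp
  | cons a t ih =>
    by_cases ha : a = m
    · subst ha
      rw [List.count_cons_self, Function.iterate_succ_apply]
      have h1 : pvRm a (a :: t) = t := by simp [pvRm]
      rw [h1, ih]
      simp
    · rw [show List.count m (a :: t) = List.count m t by simp [ha], rm_iter_cons m a ha, ih]
      simp [ha]

lemma pvGrp_cons (kv : String × List (List Int)) (R : List (String × List (List Int))) (m : List Int) :
    pvGrp (kv :: R) m = List.replicate (kv.2.count m) kv.1 ++ pvGrp R m := by
  simp only [pvGrp, pvOcc, List.flatMap_cons, List.filter_append, List.map_append]
  congr 1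
  rw [List.filter_map]
  simp only [List.map_map]
  rw [show ((fun p : List Int × String => p.1 == m) ∘ fun e => (e, kv.1)) = (fun e => e == m) by rfl]
  rw [show ((fun p : List Int × String => p.2) ∘ fun e => (e, kv.1)) = (fun _ => kv.1) by rfl]
  rw [List.map_const', List.count_eq_countP, List.countP_eq_length_filter]

lemma mem_pvGrp (R : List (String × List (List Int))) (m : List Int) (y : String)
    (h : y ∈ pvGrp R m) : y ∈ R.map Prod.fst := by
  simp only [pvGrp, pvOcc, List.mem_map, List.mem_filter, List.mem_flatMap] at h
  obtain ⟨p, ⟨⟨kv, hkv, hp⟩, -⟩, rfl⟩ := h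
  simp only [List.mem_map] at hp ⊢
  obtain ⟨e, -, rfl⟩ := hp
  exact ⟨kv, hkv, rfl⟩

-- with distinct keys, the owning key k occurs in pvGrp once per occurrence of m in k's own list
lemma count_pvGrp (m : List Int) :
    ∀ (R : List (String × List (List Int))), (R.map Prod.fst).Nodup →
    ∀ (k : String) (v : List (List Int)), (k, v) ∈ R → (pvGrp R m).count k = v.count m := by
  intro R
  induction R with
  | nil => intro _ k v h; simp at h
  | cons kv R ih =>
    intro hnd k v hin
    simp only [List.map_cons, List.nodup_cons] at hnd
    rw [pvGrp_cons, List.count_append]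
    rcases List.mem_cons.1 hin with heq | htail
    · have hk : kv.1 = k := by rw [← heq]
      have hv : kv.2 = v := by rw [← heq]
      rw [hk, hv, List.count_replicate_self]
      have h1 : k ∉ pvGrp R m := fun hc => hnd.1 (by rw [hk] at *; exact mem_pvGrp R m k hc)
      rw [List.count_eq_zero.2 h1]; omega
    · have hkne : kv.1 ≠ k := by
        intro hc
        exact hnd.1 (hc ▸ (List.mem_map.2 ⟨(k, v), htail, hc ▸ rfl⟩))
      rw [List.count_replicate, if_neg (by simpa using hkne), ih hnd.2 k v htail]
      omega

-- A's removal loop over the whole dict equals B's filter comprehension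
lemma rd_items (R : List (String × List (List Int))) (m : List Int)
    (h : (R.map Prod.fst).Nodup) :
    ((pvGrp R m).foldl (fun (d : PySem.Dict String (List (List Int))) s =>
        d.modify s [] (fun v => (PySem.List.remove? v m).getD v)) (PySem.Dict.mk R)).items
    = R.map (fun kv => (kv.1, kv.2.filter (fun e => !(e == m)))) := by
  have hmkkeys : (PySem.Dict.mk R).keys = R.map Prod.fst := by
    simp [PySem.Dict.keys]
  have hkeys : ((pvGrp R m).foldl (fun (d : PySem.Dict String (List (List Int))) s =>
      d.modify s [] (fun v => (PySem.List.remove? v m).getD v)) (PySem.Dict.mk R)).keys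
      = R.map Prod.fst := by
    rw [PySem.Dict.keys_foldl_modify_key (pvGrp R m) (fun s => s) []
      (fun _ s => fun v => (PySem.List.remove? v m).getD v) (PySem.Dict.mk R), hmkkeys,
      List.map_id', PySem.Set.update_eq_append_filter]
    have h0 : (PySem.Set.ofList (pvGrp R m)).filter
        (fun y => !(PySem.Set.contains (R.map Prod.fst) y)) = [] := by
      rw [List.filter_eq_nil_iff]
      intro y hy
      have hyR : y ∈ R.map Prod.fst :=
        mem_pvGrp R m y (by simpa [PySem.Set.mem_ofList] using hy)
      obtain ⟨kv, hkv, hfst⟩ := List.mem_map.1 hyR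
      simp only [Bool.not_eq_eq_eq_not, Bool.not_true, PySem.Set.contains_eq_listContains]
      simp
      exact ⟨kv.2, by rw [← hfst]; simpa using hkv⟩
    rw [h0, List.append_nil]
  have hnd2 : ((pvGrp R m).foldl (fun (d : PySem.Dict String (List (List Int))) s =>
      d.modify s [] (fun v => (PySem.List.remove? v m).getD v)) (PySem.Dict.mk R)).keys.Nodup := by
    rw [hkeys]; exact h
  rw [PySem.Dict.items_eq_map_keys _ hnd2 [], hkeys, List.map_map]
  apply List.map_congr_left
  intro kv hkv
  have hitems : (kv.1, kv.2) ∈ (PySem.Dict.mk R).items := by simpa using hkv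
  have hget : (PySem.Dict.mk R).getD kv.1 [] = kv.2 :=
    PySem.Dict.getD_of_mem_items _ hitems (by rw [hmkkeys]; exact h) []
  show (kv.1, _) = (kv.1, _)
  congr 1
  show ((pvGrp R m).foldl (fun d s => d.modify s [] (fun v => pvRm m v)) (PySem.Dict.mk R)).getD kv.1 []
      = _
  rw [getD_foldl_modify_rm, hget, count_pvGrp m R h kv.1 kv.2 (by simpa using hkv), rm_iter_count]

lemma insert_fold_items (m : List Int) :
    ∀ (sets : List String) (S : List String),
    ((sets.foldl (fun (d : PySem.Dict String (List (List Int))) s => d.insert s [m])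
        (PySem.Dict.mk (S.map (fun s => (s, [m]))))).items)
      = (PySem.Set.update S sets).map (fun s => (s, [m])) := by
  intro sets
  induction sets with
  | nil => intro S; rw [PySem.Set.update_nil]; rfl
  | cons s t ih =>
    intro S
    simp only [List.foldl_cons, PySem.Set.update_cons]
    by_cases hs : s ∈ S
    · have hc : (PySem.Dict.mk (S.map (fun s => (s, [m])))).contains s = true := by
        simpa [PySem.Dict.contains_mk] using hs
      have h2 : (PySem.Dict.mk (S.map (fun s => (s, [m])))).insert s [m]
          = PySem.Dict.mk (S.map (fun s => (s, [m]))) := by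
        apply PySem.Dict.ext
        rw [PySem.Dict.items_insert_of_contains _ _ hc]
        show (S.map (fun s => (s, [m]))).map _ = _
        rw [List.map_map]
        apply List.map_congr_left
        intro x _
        by_cases hx : x = s <;> simp [hx]
      rw [h2, ih, PySem.Set.add_of_mem hs]
    · have hc : (PySem.Dict.mk (S.map (fun s => (s, [m])))).contains s = false := by
        simp only [PySem.Dict.contains_mk, List.any_map, List.any_eq_false]
        intro x hx
        simpa using fun hxe : x = s => hs (hxe ▸ hx)
      have h2 : (PySem.Dict.mk (S.map (fun s => (s, [m])))).insert s [m]
          = PySem.Dict.mk ((S ++ [s]).map (fun s => (s, [m]))) := by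
        apply PySem.Dict.ext
        rw [PySem.Dict.items_insert_of_not_contains _ _ hc]
        simp
      rw [h2, ih, PySem.Set.add_of_not_mem hs]

lemma ofList_replicate_append (k : String) :
    ∀ (c : Nat) (l : List String), 0 < c →
    PySem.Set.ofList (List.replicate c k ++ l) = k :: (PySem.Set.ofList l).discard k := by
  intro c
  induction c with
  | zero => omega
  | succ c ih =>
    intro l _
    rw [List.replicate_succ, List.cons_append, PySem.Set.ofList_cons]
    by_cases hc : 0 < c
    · rw [ih l hc]
      simp [PySem.Set.discard, List.filter_filter]
    · have h0 : c = 0 := by omega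
      subst h0
      simp

-- first-insertion dedup of A's key list = B's filter comprehension over reduced
lemma ofList_pvGrp (m : List Int) :
    ∀ (R : List (String × List (List Int))), (R.map Prod.fst).Nodup →
    PySem.Set.ofList (pvGrp R m) = (R.filter (fun kv => kv.2.contains m)).map (fun kv => kv.1) := by
  intro R
  induction R with
  | nil => intro _; rfl
  | cons kv R ih =>
    intro hnd
    simp only [List.map_cons, List.nodup_cons] at hnd
    rw [pvGrp_cons]
    by_cases hm : m ∈ kv.2
    · have hcpos : 0 < kv.2.count m := List.count_pos_iff.2 hm
      rw [ofList_replicate_append kv.1 _ _ hcpos, ih hnd.2]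
      have hni : kv.1 ∉ PySem.Set.ofList (pvGrp R m) := by
        intro hc
        exact hnd.1 (mem_pvGrp R m kv.1 (by simpa [PySem.Set.mem_ofList] using hc))
      have hdi : (PySem.Set.ofList (pvGrp R m)).discard kv.1 = PySem.Set.ofList (pvGrp R m) := by
        rw [PySem.Set.discard, List.filter_eq_self]
        intro a ha
        simpa using fun hae : a = kv.1 => hni (hae ▸ ha)
      rw [← ih hnd.2, hdi, List.filter_cons_of_pos (by simpa using hm), List.map_cons, ih hnd.2]
    · have hc0 : kv.2.count m = 0 := List.count_eq_zero.2 hm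
      rw [hc0, List.replicate_zero, List.nil_append, ih hnd.2,
        List.filter_cons_of_neg (by simpa using hm)]

lemma newdict_items (R : List (String × List (List Int))) (m : List Int)
    (h : (R.map Prod.fst).Nodup) :
    ((pvGrp R m).foldl (fun (d : PySem.Dict String (List (List Int))) s => d.insert s [m])
        (PySem.Dict.mk [])).items
    = (R.filter (fun kv => kv.2.contains m)).map (fun kv => (kv.1, [m])) := by
  have h0 : (PySem.Dict.mk ([] : List (String × List (List Int))))
      = PySem.Dict.mk (([] : List String).map (fun s => (s, [m]))) := rfl
  rw [h0, insert_fold_items m (pvGrp R m) [],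
    show PySem.Set.update ([] : List String) (pvGrp R m) = PySem.Set.ofList (pvGrp R m) from rfl,
    ofList_pvGrp m R h, List.map_map]
  rfl

theorem removeAllMaxElement_ports_eq (R : List (String × List (List Int)))
    (h : (R.map Prod.fst).Nodup) :
    removeAllMaxElement R = removeAllMaxElement_alt R := by
  simp only [removeAllMaxElement, removeAllMaxElement_alt]
  rw [seen_fold]
  have helems : List.flatMap (fun kv : String × List (List Int) => kv.2) R = pvElems R := rfl
  have hfe : (PySem.Set.ofList (pvElems R)).filter
      (fun a => !(PySem.Set.contains PySem.Set.empty a)) = PySem.Set.ofList (pvElems R) :=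
    List.filter_eq_self.mpr (fun x _ => rfl)
  have hcnt : ∀ (k : List Int),
      ((pvElems R).foldl (fun d k => d.insert k (d.getD k 0 + 1))
        (PySem.Dict.mk ([] : List (List Int × Int)))).getD k 0 = ((pvElems R).count k : Int) := by
    intro k
    rw [PySem.Dict.getD_foldl_insert_add_one]
    simp [PySem.Dict.getD, PySem.Dict.get?]
  simp only [helems, hfe, hcnt, countDict_eq, countDict_items, List.foldl_map, len_pvGrp]
  cases hF : ((PySem.Set.ofList (pvElems R)).foldl (fun (st : Int × Option (List Int)) k =>
      if ((pvElems R).count k : Int) > st.1 then (((pvElems R).count k : Int), some k) else st)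
      (0, none)).2 with
  | none => rfl
  | some m =>
    simp only [countDict_getD, rd_items R m h, newdict_items R m h]

-- ===== VERDICT (by name: the statement is the Claim_ definition above) =====
theorem removeAllMaxElement_spec : Claim_equal_removeAllMaxElement := by
  intro reduced _ hpre
  unfold Spec_removeAllMaxElement
  exact removeAllMaxElement_ports_eq reduced hpre.1
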